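-- pv_equiv track=rewrite | github.com/XanderRobbins/TheGreatCommission | scripture-translate/sanity_check.py | passage_label
-- ===== SOURCE A (Python) =====
-- PASSAGES = [
--     ("Genesis",  1,  1, 20),
--     ("Psalm",   23,  1, 99),   # take all of Psalm 23 (usually ~6 verses)
--     ("Matthew",  5,  1, 12),
--     ("John",     1,  1, 14),
--     ("1 John",   1,  1, 10),
-- ]
--
-- def parse_reference(ref: str):
--     """Parse 'Genesis 1:1' → ('Genesis', 1, 1). Returns None on failure."""
--     try:
--         parts = ref.rsplit(" ", 1)
--         if len(parts) != 2:
--             return None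
--         book = parts[0].strip()
--         ch_vs = parts[1].split(":")
--         if len(ch_vs) != 2:
--             return None
--         return book, int(ch_vs[0]), int(ch_vs[1])
--     except (ValueError, IndexError):
--         return None
--
-- def passage_label(ref: str) -> str:
--     """Map a reference to a short passage label for grouping."""
--     parsed = parse_reference(ref)
--     if parsed is None:
--         return "Unknown"
--     book, ch, _ = parsed
--     for p_book, p_ch, _, _ in PASSAGES:
--         if book == p_book and ch == p_ch:
--             return f"{p_book} {p_ch}"
--     return f"{book} {ch}"
-- ===== SOURCE B (Python) =====
-- def passage_label(ref: str) -> str: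
--     """Map a reference to a short passage label for grouping."""
--     # find the last space by an explicit right-to-left scan
--     n = len(ref)
--     i = n - 1
--     while i >= 0 and ref[i] != " ":
--         i -= 1
--     if i < 0:
--         return "Unknown"
--     # one pass over the tail: route chars into chapter/verse buffers around ':'
--     chap = []
--     verse = []
--     colons = 0
--     for j in range(i + 1, n):
--         c = ref[j]
--         if c == ":":
--             colons += 1
--         elif colons == 0:
--             chap.append(c)
--         else:
--             verse.append(c)
--     if colons != 1:
--         return "Unknown"
--     try:
--         ch = int("".join(chap))
--         int("".join(verse))
--     except ValueError:
--         return "Unknown"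
--     return ref[:i].strip() + " " + str(ch)
-- ===== Notes on version B (the rewrite author's own statement) =====
-- stated objective: alternative
-- what changed: B discards parse_reference (rsplit/split library calls), the tuple plumbing and the dead PASSAGES scan, and instead locates the last space by an explicit right-to-left index scan and routes the tail's characters into chapter/verse buffers with a single-pass colon-counting state machine, formatting the label directly.
import Mathlib
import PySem

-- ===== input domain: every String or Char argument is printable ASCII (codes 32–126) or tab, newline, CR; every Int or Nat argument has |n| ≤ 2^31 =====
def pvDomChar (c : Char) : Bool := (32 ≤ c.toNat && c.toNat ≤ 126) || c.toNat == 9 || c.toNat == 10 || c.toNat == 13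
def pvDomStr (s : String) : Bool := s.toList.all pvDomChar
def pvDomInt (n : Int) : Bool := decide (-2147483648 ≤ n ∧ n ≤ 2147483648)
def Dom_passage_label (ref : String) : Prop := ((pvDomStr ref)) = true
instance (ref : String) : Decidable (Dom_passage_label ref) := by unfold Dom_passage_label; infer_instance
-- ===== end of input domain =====

-- B replaces rsplit/split/parse_reference and the (dead) PASSAGES loop with one explicit
-- right-to-left scan for the last space and a single-pass state machine over the tail;
-- objective: simpler decomposition, same cost.

-- ===== PORT A =====
def PASSAGES : List (String × Int × Int × Int) :=
  [("Genesis", 1, 1, 20), ("Psalm", 23, 1, 99), ("Matthew", 5, 1, 12),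
   ("John", 1, 1, 14), ("1 John", 1, 1, 10)]

-- hand port of s.rsplit(" ", 1) (no PySem rsplit): split at the LAST space; exact for a
-- one-char separator with maxsplit=1
def pyRsplitSpace1 (cs : List Char) : List (List Char) :=
  if ' ' ∈ cs then
    let j := cs.length - 1 - cs.reverse.idxOf ' '
    [cs.take j, cs.drop (j + 1)]
  else [cs]

def parse_reference (ref : String) : Option (String × Int × Int) :=
  let parts := pyRsplitSpace1 ref.toList
  if parts.length ≠ 2 then none
  else
    let book := PySem.Chars.strip parts[0]!
    let ch_vs := PySem.Chars.splitOn parts[1]! [':']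
    if ch_vs.length ≠ 2 then none
    else
      match PySem.Int.ofChars? ch_vs[0]!, PySem.Int.ofChars? ch_vs[1]! with
      | some c, some v => some (String.mk book, c, v)
      | _, _ => none

def passageLoop (book : String) (ch : Int) : List (String × Int × Int × Int) → String
  | [] => book ++ " " ++ PySem.Int.toStr ch
  | (pb, pc, _, _) :: rest =>
      if book == pb && ch == pc then pb ++ " " ++ PySem.Int.toStr pc
      else passageLoop book ch rest

def passage_label (ref : String) : String :=
  match parse_reference ref with
  | none => "Unknown"
  | some (book, ch, _) => passageLoop book ch PASSAGES

-- ===== PORT B =====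
-- the while loop 'i = n-1; while i >= 0 and ref[i] != " ": i -= 1' (argument = i + 1;
-- none = the loop ran off the left end, i.e. Python's i < 0)
def lastSpaceAux (cs : List Char) : Nat → Option Nat
  | 0 => none
  | n + 1 => if cs.getD n '?' == ' ' then some n else lastSpaceAux cs n

-- body of the for loop: state (chap, verse, colons)
def tailStep (st : List Char × List Char × Int) (c : Char) : List Char × List Char × Int :=
  if c == ':' then (st.1, st.2.1, st.2.2 + 1)
  else if st.2.2 == 0 then (st.1 ++ [c], st.2.1, st.2.2)
  else (st.1, st.2.1 ++ [c], st.2.2)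

def passage_label_alt (ref : String) : String :=
  let cs := ref.toList
  match lastSpaceAux cs cs.length with
  | none => "Unknown"
  | some i =>
    let st := (cs.drop (i + 1)).foldl tailStep (([] : List Char), ([] : List Char), (0 : Int))
    if st.2.2 ≠ 1 then "Unknown"
    else
      match PySem.Int.ofChars? st.1, PySem.Int.ofChars? st.2.1 with
      | some ch, some _ => String.mk (PySem.Chars.strip (cs.take i)) ++ " " ++ PySem.Int.toStr ch
      | _, _ => "Unknown"

-- ===== PRECONDITION & SPEC =====
def Spec_passage_label (ref : String) (out : String) : Prop := out = passage_label_alt ref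
instance (ref : String) (out : String) : Decidable (Spec_passage_label ref out) := by unfold Spec_passage_label; infer_instance

-- ===== CLAIM (what is proved, stated in full; the proofs are below) =====
def Claim_equal_passage_label : Prop := ∀ (ref : String), Dom_passage_label ref → Spec_passage_label ref (passage_label ref)

-- ===== LEMMAS AND PROOFS =====

-- canonical recursive description of splitting on a single-character separator
def splitOne (c : Char) : List Char → List (List Char)
  | [] => [[]]
  | a :: rest =>
      if a = c then [] :: splitOne c rest
      else match splitOne c rest with
           | x :: xs => (a :: x) :: xs
           | [] => [[a]]

theorem splitOne_ne_nil (c : Char) (l : List Char) : splitOne c l ≠ [] := by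
  induction l with
  | nil => simp [splitOne]
  | cons a rest ih =>
    simp only [splitOne]
    split_ifs with h
    · simp
    · cases hs : splitOne c rest <;> simp

theorem go_single (c : Char) (l : List Char) : ∀ (fuel : Nat) (cur : List Char)
    (acc : List (List Char)), l.length < fuel →
    PySem.Chars.splitOn.go [c] fuel l cur acc =
      acc.reverse ++ (splitOne c l).modifyHead (cur.reverse ++ ·) := by
  induction l with
  | nil =>
    intro fuel cur acc hf
    cases fuel with
    | zero => omega
    | succ f => simp [PySem.Chars.splitOn.go, splitOne]
  | cons a rest ih =>
    intro fuel cur acc hf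
    cases fuel with
    | zero => omega
    | succ f =>
      by_cases hac : a = c
      · subst hac
        have hp : List.isPrefixOf [a] (a :: rest) = true := by
          simp [List.isPrefixOf]
        rw [PySem.Chars.splitOn.go, if_pos hp]
        simp only [List.length_cons] at hf
        have := ih f [] (cur.reverse :: acc) (by omega)
        simp only [] at *
        rw [show List.drop (List.length [a]) (a :: rest) = rest by simp]
        rw [this]
        cases hs : splitOne a rest with
        | nil => exact absurd hs (splitOne_ne_nil a rest)
        | cons x xs => simp [splitOne, hs]
      · have hp : List.isPrefixOf [c] (a :: rest) = false := by
          simp [List.isPrefixOf]; exact fun h => absurd h.symm hac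
        rw [PySem.Chars.splitOn.go, if_neg (by simp [hp])]
        simp only [List.length_cons] at hf
        rw [ih f (a :: cur) acc (by omega)]
        cases hs : splitOne c rest with
        | nil => exact absurd hs (splitOne_ne_nil c rest)
        | cons x xs => simp [splitOne, hs, if_neg hac]

theorem splitOn_single (l : List Char) (c : Char) :
    PySem.Chars.splitOn l [c] = splitOne c l := by
  have := go_single c l (l.length + 1) [] [] (by omega)
  simp only [List.reverse_nil, List.nil_append] at this
  rw [PySem.Chars.splitOn, this]
  cases hs : splitOne c l with
  | nil => exact absurd hs (splitOne_ne_nil c l)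
  | cons x xs => simp

theorem splitOne_length (c : Char) (l : List Char) :
    (splitOne c l).length = l.count c + 1 := by
  induction l with
  | nil => simp [splitOne]
  | cons a rest ih =>
    simp only [splitOne]
    split_ifs with h
    · subst h; simp [ih]
    · cases hs : splitOne c rest with
      | nil => exact absurd hs (splitOne_ne_nil c rest)
      | cons x xs =>
        rw [hs] at ih
        simp only [List.length_cons] at ih ⊢
        simp [List.count_cons, ih]
        omega

theorem not_mem_take_idxOf (c : Char) (l : List Char) : c ∉ l.take (l.idxOf c) := by
  induction l with
  | nil => simp
  | cons a rest ih =>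
    by_cases h : a = c
    · subst h; simp [List.idxOf_cons_self]
    · rw [List.idxOf_cons_ne _ (by exact fun hh => h (by simpa using hh))]
      simp only [List.take_succ_cons, List.mem_cons]
      rintro (rfl | hm)
      · exact h rfl
      · exact ih hm

theorem splitOne_unfold (c : Char) (l : List Char) (h : c ∈ l) :
    splitOne c l = l.take (l.idxOf c) :: splitOne c (l.drop (l.idxOf c + 1)) := by
  induction l with
  | nil => simp at h
  | cons a rest ih =>
    by_cases hac : a = c
    · subst hac; simp [splitOne, List.idxOf_cons_self]
    · have hm : c ∈ rest := by
        rcases List.mem_cons.mp h with h1 | h1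
        · exact absurd h1.symm hac
        · exact h1
      rw [List.idxOf_cons_ne _ (by exact fun hh => hac (by simpa using hh))]
      simp only [splitOne, if_neg hac, List.take_succ_cons, List.drop_succ_cons]
      rw [ih hm]

theorem splitOne_of_not_mem (c : Char) (l : List Char) (h : c ∉ l) :
    splitOne c l = [l] := by
  induction l with
  | nil => simp [splitOne]
  | cons a rest ih =>
    have h1 : ¬ a = c := by rintro rfl; exact h (List.mem_cons_self)
    have h2 : c ∉ rest := fun hm => h (List.mem_cons_of_mem _ hm)
    simp [splitOne, if_neg h1, ih h2]

-- when the separator occurs exactly once, the pieces are take/drop around its first index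
theorem count_parts (c : Char) (l : List Char) (h : l.count c = 1) :
    c ∉ l.drop (l.idxOf c + 1) ∧ splitOne c l = [l.take (l.idxOf c), l.drop (l.idxOf c + 1)] := by
  have hm : c ∈ l := List.count_pos_iff.mp (by omega)
  have hlt : l.idxOf c < l.length := List.idxOf_lt_length_of_mem hm
  have hdecomp : l = l.take (l.idxOf c) ++ c :: l.drop (l.idxOf c + 1) := by
    conv_lhs => rw [← List.take_append_drop (l.idxOf c) l]
    congr 1
    rw [List.drop_eq_getElem_cons hlt]
    congr 1
    exact List.getElem_idxOf hlt
  have hcnt : l.count c = (l.take (l.idxOf c)).count c + (1 + (l.drop (l.idxOf c + 1)).count c) := by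
    conv_lhs => rw [hdecomp]
    simp [List.count_append]
    omega
  have htake : (l.take (l.idxOf c)).count c = 0 :=
    List.count_eq_zero.mpr (not_mem_take_idxOf c l)
  have hdrop : (l.drop (l.idxOf c + 1)).count c = 0 := by omega
  have hnm : c ∉ l.drop (l.idxOf c + 1) := List.count_eq_zero.mp hdrop
  exact ⟨hnm, by rw [splitOne_unfold c l hm, splitOne_of_not_mem c _ hnm]⟩

-- the PASSAGES loop is dead: a matched entry produces exactly the fallback string
theorem passageLoop_eq (book : String) (ch : Int) :
    passageLoop book ch PASSAGES = book ++ " " ++ PySem.Int.toStr ch := by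
  simp only [PASSAGES, passageLoop]
  split_ifs with h1 h2 h3 h4 h5 <;>
    first
    | rfl
    | (simp only [Bool.and_eq_true, beq_iff_eq] at *; obtain ⟨hb, hc⟩ := ‹_ ∧ _›; rw [hb, hc])

-- B's while loop finds the LAST space of the prefix cs.take m, as A's rsplit index expresses it
theorem lastSpaceAux_eq (cs : List Char) : ∀ (m : Nat), m ≤ cs.length →
    lastSpaceAux cs m =
      if ' ' ∈ cs.take m
      then some (m - 1 - List.idxOf ' ' (cs.take m).reverse)
      else none := by
  intro m
  induction m with
  | zero => intro _; simp [lastSpaceAux]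
  | succ n ih =>
    intro hm
    have hn : n < cs.length := by omega
    have hget : cs.getD n '?' = cs[n] := by
      simp [List.getD, List.getElem?_eq_getElem hn]
    have htake : cs.take (n + 1) = cs.take n ++ [cs[n]] := by
      rw [List.take_add_one, List.getElem?_eq_getElem hn]; rfl
    by_cases hsp : cs[n] = ' '
    · rw [lastSpaceAux, if_pos (by rw [hget, hsp]; rfl), htake, hsp]
      have h0 : List.idxOf ' ' (cs.take n ++ [' ']).reverse = 0 := by
        rw [List.reverse_append]; simp
      rw [if_pos (by simp), h0]
      simp
    · have hne : (cs.getD n '?' == ' ') = false := by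
        rw [hget]; exact beq_eq_false_iff_ne.mpr hsp
      rw [lastSpaceAux, if_neg (by rw [hne]; simp), ih (by omega), htake]
      have hmem : (' ' ∈ cs.take n ++ [cs[n]]) ↔ (' ' ∈ cs.take n) := by
        constructor
        · intro h
          rcases List.mem_append.mp h with h | h
          · exact h
          · exact absurd (List.mem_singleton.mp h).symm hsp
        · exact fun h => List.mem_append.mpr (Or.inl h)
      by_cases hm2 : ' ' ∈ cs.take n
      · rw [if_pos hm2, if_pos (hmem.mpr hm2)]
        have hr : List.idxOf ' ' (cs.take n ++ [cs[n]]).reverse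
            = List.idxOf ' ' (cs.take n).reverse + 1 := by
          rw [List.reverse_append]
          simp only [List.reverse_singleton, List.singleton_append]
          exact List.idxOf_cons_ne _ hsp
        have hmemr : ' ' ∈ (cs.take n).reverse := List.mem_reverse.mpr hm2
        have hlt := List.idxOf_lt_length_of_mem hmemr
        rw [List.length_reverse, List.length_take] at hlt
        rw [hr]
        congr 1
        omega
      · rw [if_neg hm2, if_neg (fun h => hm2 (hmem.mp h))]

-- fold invariant once at least one colon was seen: everything non-colon goes to verse
theorem fold_pos (l : List Char) : ∀ (ch vs : List Char) (k : Int), 0 < k →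
    l.foldl tailStep (ch, vs, k) = (ch, vs ++ l.filter (· ≠ ':'), k + l.count ':') := by
  induction l with
  | nil => intro ch vs k hk; simp
  | cons a rest ih =>
    intro ch vs k hk
    rw [List.foldl_cons]
    by_cases ha : a = ':'
    · subst ha
      have hstep : tailStep (ch, vs, k) ':' = (ch, vs, k + 1) := by simp [tailStep]
      rw [hstep, ih ch vs (k + 1) (by omega)]
      simp only [Prod.mk.injEq]
      refine ⟨by trivial, by simp, ?_⟩
      simp only [List.count_cons_self]
      push_cast
      ring
    · have hk0 : (k == 0) = false := by
        simp only [beq_eq_false_iff_ne, ne_eq]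
        omega
      have hstep : tailStep (ch, vs, k) a = (ch, vs ++ [a], k) := by
        simp [tailStep, ha, hk0]
      rw [hstep, ih ch (vs ++ [a]) k hk]
      simp only [Prod.mk.injEq]
      refine ⟨by trivial, by simp [ha], by simp [ha]⟩

-- fold invariant before any colon: chars accumulate into chap until the first colon
theorem fold_zero (l : List Char) : ∀ (ch vs : List Char),
    l.foldl tailStep (ch, vs, 0) =
      if ':' ∈ l then
        (ch ++ l.take (List.idxOf ':' l),
         vs ++ (l.drop (List.idxOf ':' l + 1)).filter (· ≠ ':'),
         (l.count ':' : Int))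
      else (ch ++ l, vs, 0) := by
  induction l with
  | nil => intro ch vs; simp
  | cons a rest ih =>
    intro ch vs
    rw [List.foldl_cons]
    by_cases ha : a = ':'
    · subst ha
      have hstep : tailStep (ch, vs, 0) ':' = (ch, vs, 1) := by simp [tailStep]
      rw [hstep, fold_pos rest ch vs 1 (by omega), if_pos (List.mem_cons_self)]
      simp only [List.idxOf_cons_self, List.take_zero, List.drop_succ_cons, List.drop_zero,
        List.append_nil, Prod.mk.injEq]
      refine ⟨by trivial, by trivial, ?_⟩
      simp only [List.count_cons_self]
      push_cast
      ring
    · have hstep : tailStep (ch, vs, 0) a = (ch ++ [a], vs, 0) := by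
        simp [tailStep, ha]
      rw [hstep, ih (ch ++ [a]) vs]
      have hidx : List.idxOf ':' (a :: rest) = List.idxOf ':' rest + 1 :=
        List.idxOf_cons_ne _ ha
      by_cases hm : ':' ∈ rest
      · rw [if_pos hm, if_pos (List.mem_cons_of_mem _ hm), hidx]
        simp [ha]
      · rw [if_neg hm, if_neg (by
          intro h
          rcases List.mem_cons.mp h with h1 | h1
          · exact ha h1.symm
          · exact hm h1)]
        simp

-- main equivalence of the two ports
theorem ports_agree (ref : String) : passage_label ref = passage_label_alt ref := by
  simp only [passage_label, passage_label_alt, parse_reference, pyRsplitSpace1]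
  set cs := ref.toList with hcs
  by_cases hs : ' ' ∈ cs
  · -- a space exists: both sides locate the last one at index j
    set j := cs.length - 1 - List.idxOf ' ' cs.reverse with hj
    have hls : lastSpaceAux cs cs.length = some j := by
      rw [lastSpaceAux_eq cs cs.length le_rfl, List.take_length, if_pos hs, hj]
    rw [if_pos hs, hls]
    have hA2 : ¬([List.take j cs, List.drop (j + 1) cs].length ≠ 2) := by simp
    rw [if_neg hA2]
    set tail := cs.drop (j + 1) with htail
    simp only [List.getElem!_cons_zero, List.getElem!_cons_succ]
    rw [splitOn_single tail ':']
    by_cases hcnt : tail.count ':' = 1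
    · -- exactly one colon: both sides parse chapter and verse from the same pieces
      obtain ⟨hnm, hsp1⟩ := count_parts ':' tail hcnt
      have hmem : ':' ∈ tail := List.count_pos_iff.mp (by omega)
      have hfil : (tail.drop (List.idxOf ':' tail + 1)).filter (· ≠ ':')
          = tail.drop (List.idxOf ':' tail + 1) := by
        apply List.filter_eq_self.mpr
        intro a ha
        simp only [decide_eq_true_eq, ne_eq]
        rintro rfl
        exact hnm ha
      have hst : tail.foldl tailStep (([] : List Char), ([] : List Char), (0 : Int))
          = (tail.take (List.idxOf ':' tail), tail.drop (List.idxOf ':' tail + 1), (1 : Int)) := by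
        rw [fold_zero tail [] [], if_pos hmem, hcnt, hfil]
        simp
      rw [hsp1, hst]
      cases h0 : PySem.Int.ofChars? (List.take (List.idxOf ':' tail) tail) with
      | none => simp [h0]
      | some c =>
        cases h1 : PySem.Int.ofChars? (List.drop (List.idxOf ':' tail + 1) tail) with
        | none => simp [h0, h1]
        | some v => simp [h0, h1, passageLoop_eq]
    · -- not exactly one colon: both sides report "Unknown"
      have hlen : (splitOne ':' tail).length ≠ 2 := by
        rw [splitOne_length]; omega
      rw [if_pos hlen, fold_zero tail [] []]
      by_cases hmem : ':' ∈ tail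
      · have hc : ((tail.count ':' : Int) ≠ 1) := by
          intro h
          exact hcnt (by exact_mod_cast h)
        simp [hmem, hc]
      · simp [hmem]
  · -- no space: A's rsplit gives one part, B's scan runs off the left end
    have hls : lastSpaceAux cs cs.length = none := by
      rw [lastSpaceAux_eq cs cs.length le_rfl, List.take_length, if_neg hs]
    rw [if_neg hs, hls]
    simp

-- ===== VERDICT (by name: the statement is the Claim_ definition above) =====
theorem passage_label_spec : Claim_equal_passage_label := by
  intro ref _
  unfold Spec_passage_label
  exact ports_agree ref
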